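-- pv_equiv track=rewrite | github.com/RicoChen1/CS_526_Algo | HW5/vowel_morse.py | count_vowel_sequences
-- ===== SOURCE A (Python) =====
-- VOWEL_CODES = {
--     'A': '.-',
--     'E': '.',
--     'I': '..',
--     'O': '---',
--     'U': '..-'
-- }
--
-- def count_vowel_sequences(s: str) -> int:
--     # DP count ways to split s into vowel codes
--     n = len(s)
--     dp = [0] * (n + 1)
--     dp[0] = 1
--     codes = list(VOWEL_CODES.values())
--     for i in range(n):
--         if dp[i] == 0:
--             continue
--         for code in codes:
--             L = len(code)
--             if i + L <= n and s[i:i + L] == code: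
--                 dp[i + L] += dp[i]
--     return dp[n]
-- ===== SOURCE B (Python) =====
-- VOWEL_CODES = {
--     'A': '.-',
--     'E': '.',
--     'I': '..',
--     'O': '---',
--     'U': '..-'
-- }
--
-- def count_vowel_sequences(s: str) -> int:
--     # Top-down memoized recursion over suffix start positions.
--     n = len(s)
--     codes = list(VOWEL_CODES.values())
--     memo = {}
--
--     def count(i):
--         if i == n:
--             return 1
--         if i in memo:
--             return memo[i]
--         total = 0
--         for code in codes:
--             if s.startswith(code, i):
--                 total += count(i + len(code))
--         memo[i] = total
--         return total
--
--     return count(0)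
-- ===== Notes on version B (the rewrite author's own statement) =====
-- stated objective: alternative
-- what changed: Replaces A's forward bottom-up dp array (scatter: dp[i+L] += dp[i] pushed ahead over every index 0..n-1) by top-down memoized recursion count(i) over suffix start positions (gather: sum of count(i+len(code)) over matching codes, dict memo).
import Mathlib
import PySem

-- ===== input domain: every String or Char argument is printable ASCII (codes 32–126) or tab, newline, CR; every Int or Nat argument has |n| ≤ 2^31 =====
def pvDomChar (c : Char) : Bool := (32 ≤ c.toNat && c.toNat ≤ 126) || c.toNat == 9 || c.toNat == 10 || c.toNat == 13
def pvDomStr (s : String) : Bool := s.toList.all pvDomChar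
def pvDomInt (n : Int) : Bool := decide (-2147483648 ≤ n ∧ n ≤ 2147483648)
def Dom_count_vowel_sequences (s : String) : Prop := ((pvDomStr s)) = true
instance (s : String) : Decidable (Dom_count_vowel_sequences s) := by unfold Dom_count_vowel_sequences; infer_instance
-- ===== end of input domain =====

-- B replaces A's forward (scatter) DP array fill by top-down memoized recursion over
-- suffix start positions; objective: alternative decomposition, same O(n) cost.

-- ===== PORT A =====
-- codes = list(VOWEL_CODES.values())
def pvCodesA : List (List Char) := [['.', '-'], ['.'], ['.', '.'], ['-', '-', '-'], ['.', '.', '-']]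

-- the body of A's inner 'for code in codes' loop; s[i:i+L] == code is ported as
-- (cs.drop i).take L = code, exact here since 0 ≤ i and L ≥ 0
def pvInnerA (cs : List Char) (n i : Nat) (dp : List Int) (code : List Char) : List Int :=
  let L := code.length
  if i + L ≤ n ∧ (cs.drop i).take L = code then
    dp.set (i + L) (dp.getD (i + L) 0 + dp.getD i 0)
  else dp

-- the body of A's outer 'for i in range(n)' loop, with the 'if dp[i] == 0: continue'
def pvStepA (cs : List Char) (n : Nat) (dp : List Int) (i : Nat) : List Int :=
  if dp.getD i 0 = 0 then dp
  else pvCodesA.foldl (pvInnerA cs n i) dp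

def count_vowel_sequences (s : String) : Int :=
  let cs := s.toList
  let n := cs.length
  let dp := (List.replicate (n + 1) (0 : Int)).set 0 1   -- dp = [0]*(n+1); dp[0] = 1
  let dp := (List.range n).foldl (pvStepA cs n) dp
  dp.getD n 0

-- ===== PORT B =====
def pvCodesB : List (List Char) := [['.', '-'], ['.'], ['.', '.'], ['-', '-', '-'], ['.', '.', '-']]

-- the memoized recursion 'count(i)' of B; the memo dict is threaded through as a
-- PySem.Dict, and the recursion is made structural on a fuel n+1-i can never exhaust.
-- s.startswith(code, i) is ported as (cs.drop i).take code.length = code, exact for 0 ≤ i.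
def pvCountB (cs : List Char) : Nat → Nat → PySem.Dict Nat Int → Int × PySem.Dict Nat Int
  | 0, _, memo => (0, memo)   -- fuel exhausted: unreachable when fuel > cs.length - i
  | fuel + 1, i, memo =>
    if i = cs.length then (1, memo)
    else
      match memo.get? i with
      | some v => (v, memo)
      | none =>
        let r := pvCodesB.foldl (fun (acc : Int × PySem.Dict Nat Int) code =>
          if (cs.drop i).take code.length = code then
            let p := pvCountB cs fuel (i + code.length) acc.2
            (acc.1 + p.1, p.2)
          else acc) (0, memo)
        (r.1, r.2.insert i r.1)

def count_vowel_sequences_alt (s : String) : Int :=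
  (pvCountB s.toList (s.toList.length + 1) 0 PySem.Dict.empty).1

-- ===== PRECONDITION & SPEC =====
def Spec_count_vowel_sequences (s : String) (out : Int) : Prop := out = count_vowel_sequences_alt s
instance (s : String) (out : Int) : Decidable (Spec_count_vowel_sequences s out) := by unfold Spec_count_vowel_sequences; infer_instance

-- ===== CLAIM (what is proved, stated in full; the proofs are below) =====
def Claim_equal_count_vowel_sequences : Prop := ∀ (s : String), Dom_count_vowel_sequences s → Spec_count_vowel_sequences s (count_vowel_sequences s)

-- ===== LEMMAS AND PROOFS =====

-- the mathematical suffix count: pvW cs i = number of ways to split cs[i:] into codes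
def pvW (cs : List Char) (i : Nat) : Int :=
  if h : cs.length ≤ i then 1
  else
    (if (cs.drop i).take 2 = ['.', '-'] then pvW cs (i + 2) else 0)
    + (if (cs.drop i).take 1 = ['.'] then pvW cs (i + 1) else 0)
    + (if (cs.drop i).take 2 = ['.', '.'] then pvW cs (i + 2) else 0)
    + (if (cs.drop i).take 3 = ['-', '-', '-'] then pvW cs (i + 3) else 0)
    + (if (cs.drop i).take 3 = ['.', '.', '-'] then pvW cs (i + 3) else 0)
termination_by cs.length - i
decreasing_by all_goals omega

lemma pvW_base (cs : List Char) (i : Nat) (h : cs.length ≤ i) : pvW cs i = 1 := by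
  rw [pvW]; simp [h]

lemma pvW_step (cs : List Char) (i : Nat) (h : i < cs.length) :
    pvW cs i =
      ((pvCodesA.map fun c => if (cs.drop i).take c.length = c then pvW cs (i + c.length) else 0)).sum := by
  rw [pvW]; simp [pvCodesA, Nat.not_le.mpr h]; ring

lemma pvW_stepB (cs : List Char) (i : Nat) (h : i < cs.length) :
    pvW cs i =
      ((pvCodesB.map fun c => if (cs.drop i).take c.length = c then pvW cs (i + c.length) else 0)).sum := by
  rw [pvW]; simp [pvCodesB, Nat.not_le.mpr h]; ring

-- a successful prefix match at i fits inside the string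
lemma pvMatch_le (cs : List Char) (i : Nat) (code : List Char) (hi : i ≤ cs.length)
    (h : (cs.drop i).take code.length = code) : i + code.length ≤ cs.length := by
  have := congrArg List.length h
  simp [List.length_take, List.length_drop] at this
  omega

-- getD through List.set
lemma pvGetD_set_ne (l : List Int) (k j : Nat) (v : Int) (h : j ≠ k) :
    (l.set k v).getD j 0 = l.getD j 0 := by
  simp [List.getD, Ne.symm h]

lemma pvGetD_set_self (l : List Int) (k : Nat) (v : Int) (h : k < l.length) :
    (l.set k v).getD k 0 = v := by
  simp [List.getD, h]

-- A-side weighted sum over positions i..cs.length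
def pvSum (cs : List Char) (dp : List Int) (i : Nat) : Int :=
  ((List.range' i (cs.length + 1 - i)).map fun j => dp.getD j 0 * pvW cs j).sum

lemma pvSum_set (cs : List Char) (dp : List Int) (k : Nat) (v : Int) (hk : k < dp.length) :
    ∀ m i, i ≤ k → k < i + m →
    ((List.range' i m).map fun j => (dp.set k v).getD j 0 * pvW cs j).sum
      = ((List.range' i m).map fun j => dp.getD j 0 * pvW cs j).sum
        + (v - dp.getD k 0) * pvW cs k := by
  intro m
  induction m with
  | zero => intro i h1 h2; omega
  | succ m ih =>
    intro i h1 h2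
    simp only [List.range'_succ, List.map_cons, List.sum_cons]
    by_cases hik : k = i
    · subst hik
      rw [pvGetD_set_self _ _ _ hk]
      have tail : (List.range' (k + 1) m).map (fun j => (dp.set k v).getD j 0 * pvW cs j)
          = (List.range' (k + 1) m).map (fun j => dp.getD j 0 * pvW cs j) := by
        apply List.map_congr_left
        intro j hj
        have hj' := (List.mem_range'_1.mp hj).1
        rw [pvGetD_set_ne _ _ _ _ (by omega)]
      rw [tail]; ring
    · rw [pvGetD_set_ne _ _ _ _ (Ne.symm hik)]
      rw [ih (i + 1) (by omega) (by omega)]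
      ring

lemma pvSum_cons (cs : List Char) (dp : List Int) (i : Nat) (hi : i ≤ cs.length) :
    pvSum cs dp i = dp.getD i 0 * pvW cs i + pvSum cs dp (i + 1) := by
  unfold pvSum
  have h1 : cs.length + 1 - i = (cs.length + 1 - (i + 1)) + 1 := by omega
  rw [h1, List.range'_succ, List.map_cons, List.sum_cons]

-- pvSum after a single set
lemma pvSum_set' (cs : List Char) (dp : List Int) (k : Nat) (v : Int) (hk : k < dp.length)
    (i : Nat) (h1 : i ≤ k) (h2 : k ≤ cs.length) :
    pvSum cs (dp.set k v) i = pvSum cs dp i + (v - dp.getD k 0) * pvW cs k := by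
  unfold pvSum
  exact pvSum_set cs dp k v hk _ i h1 (by omega)

-- effect of A's inner code loop on pvSum
lemma pvA_fold (cs : List Char) (i : Nat) (hi : i < cs.length) (d : Int) :
    ∀ (codes : List (List Char)), (∀ c ∈ codes, c ≠ []) →
    ∀ (dp : List Int), dp.length = cs.length + 1 → dp.getD i 0 = d →
      (codes.foldl (pvInnerA cs cs.length i) dp).length = cs.length + 1 ∧
      (codes.foldl (pvInnerA cs cs.length i) dp).getD i 0 = d ∧
      pvSum cs (codes.foldl (pvInnerA cs cs.length i) dp) (i + 1)
        = pvSum cs dp (i + 1)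
          + d * ((codes.map fun c => if (cs.drop i).take c.length = c then pvW cs (i + c.length) else 0)).sum := by
  intro codes
  induction codes with
  | nil => intro _ dp h1 h2; exact ⟨h1, h2, by simp⟩
  | cons c cst ih =>
    intro hne dp h1 h2
    have hcne : c ≠ [] := hne c (by simp)
    have hL : 0 < c.length := List.length_pos_of_ne_nil hcne
    simp only [List.foldl_cons, List.map_cons, List.sum_cons]
    by_cases hm : (cs.drop i).take c.length = c
    · have hle : i + c.length ≤ cs.length := pvMatch_le cs i c hi.le hm
      have hdp1 : pvInnerA cs cs.length i dp c
          = dp.set (i + c.length) (dp.getD (i + c.length) 0 + dp.getD i 0) := by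
        simp [pvInnerA, hm, hle]
      obtain ⟨l1, g1, s1⟩ := ih (fun x hx => hne x (by simp [hx]))
        (pvInnerA cs cs.length i dp c)
        (by rw [hdp1]; simpa using h1)
        (by rw [hdp1, pvGetD_set_ne _ _ _ _ (by omega)]; exact h2)
      refine ⟨l1, g1, ?_⟩
      rw [s1, hdp1, pvSum_set' cs dp (i + c.length) _ (by omega) (i + 1) (by omega) hle, if_pos hm, h2]
      ring
    · have hdp1 : pvInnerA cs cs.length i dp c = dp := by
        simp [pvInnerA, hm]
      obtain ⟨l1, g1, s1⟩ := ih (fun x hx => hne x (by simp [hx]))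
        (pvInnerA cs cs.length i dp c) (by rw [hdp1]; exact h1) (by rw [hdp1]; exact h2)
      refine ⟨l1, g1, ?_⟩
      rw [s1, hdp1, if_neg hm]
      ring

lemma pvA_loop (cs : List Char) :
    ∀ m i (dp : List Int), i + m = cs.length → dp.length = cs.length + 1 →
    ((List.range' i m).foldl (pvStepA cs cs.length) dp).getD cs.length 0 = pvSum cs dp i := by
  intro m
  induction m with
  | zero =>
    intro i dp h1 h2
    have hi : i = cs.length := by omega
    subst hi
    unfold pvSum
    have h3 : cs.length + 1 - cs.length = 1 := by omega
    rw [h3]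
    simp [List.range'_one, pvW_base cs cs.length le_rfl]
  | succ m ih =>
    intro i dp h1 h2
    have hi : i < cs.length := by omega
    rw [List.range'_succ, List.foldl_cons]
    by_cases h0 : dp.getD i 0 = 0
    · rw [show pvStepA cs cs.length dp i = dp from by unfold pvStepA; rw [if_pos h0]]
      rw [ih (i + 1) dp (by omega) h2, pvSum_cons cs dp i hi.le, h0]
      ring
    · rw [show pvStepA cs cs.length dp i = pvCodesA.foldl (pvInnerA cs cs.length i) dp from by
        unfold pvStepA; rw [if_neg h0]]
      obtain ⟨l1, g1, s1⟩ := pvA_fold cs i hi (dp.getD i 0) pvCodesA (by decide) dp h2 rfl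
      rw [ih (i + 1) _ (by omega) l1, s1, pvSum_cons cs dp i hi.le, pvW_step cs i hi]
      ring

-- entries ≥ 1 of the initial dp are 0
lemma pvSum_dp0 (cs : List Char) :
    ∀ m i, 1 ≤ i →
    ((List.range' i m).map fun j =>
        ((List.replicate (cs.length + 1) (0 : Int)).set 0 1).getD j 0 * pvW cs j).sum = 0 := by
  intro m
  induction m with
  | zero => intro i _; simp
  | succ m ih =>
    intro i hi
    rw [List.range'_succ, List.map_cons, List.sum_cons, ih (i + 1) (by omega)]
    rw [pvGetD_set_ne _ _ _ _ (by omega)]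
    simp [List.getD, List.getElem?_replicate]
    split <;> simp

lemma pvA_eq (s : String) : count_vowel_sequences s = pvW s.toList 0 := by
  unfold count_vowel_sequences
  show ((List.range s.toList.length).foldl (pvStepA s.toList s.toList.length)
      ((List.replicate (s.toList.length + 1) (0 : Int)).set 0 1)).getD s.toList.length 0
    = pvW s.toList 0
  rw [List.range_eq_range']
  rw [pvA_loop s.toList s.toList.length 0 _ (by omega) (by simp)]
  rw [pvSum_cons s.toList _ 0 (by omega)]
  rw [pvGetD_set_self _ _ _ (by simp)]
  unfold pvSum
  rw [pvSum_dp0 s.toList _ 1 le_rfl]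
  ring

-- a name for B's inner 'for code in codes' fold (definitionally the foldl in pvCountB)
def pvFoldB (cs : List Char) (fuel i : Nat) (acc : Int × PySem.Dict Nat Int) : Int × PySem.Dict Nat Int :=
  pvCodesB.foldl (fun (acc : Int × PySem.Dict Nat Int) code =>
    if (cs.drop i).take code.length = code then
      let p := pvCountB cs fuel (i + code.length) acc.2
      (acc.1 + p.1, p.2)
    else acc) acc

-- B-side memo invariant
def pvInv (cs : List Char) (memo : PySem.Dict Nat Int) : Prop :=
  ∀ k v, memo.get? k = some v → v = pvW cs k

lemma pvB_fold (cs : List Char) (fuel : Nat)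
    (IH : ∀ i memo, i ≤ cs.length → cs.length - i < fuel → pvInv cs memo →
      (pvCountB cs fuel i memo).1 = pvW cs i ∧ pvInv cs (pvCountB cs fuel i memo).2)
    (i : Nat) (hi : i < cs.length) (hf : cs.length - i ≤ fuel) :
    ∀ (codes : List (List Char)), (∀ c ∈ codes, c ≠ []) →
    ∀ (t : Int) (memo : PySem.Dict Nat Int), pvInv cs memo →
    (codes.foldl (fun (acc : Int × PySem.Dict Nat Int) code =>
        if (cs.drop i).take code.length = code then
          let p := pvCountB cs fuel (i + code.length) acc.2
          (acc.1 + p.1, p.2)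
        else acc) (t, memo)).1
      = t + ((codes.map fun c => if (cs.drop i).take c.length = c then pvW cs (i + c.length) else 0)).sum
    ∧ pvInv cs ((codes.foldl (fun (acc : Int × PySem.Dict Nat Int) code =>
        if (cs.drop i).take code.length = code then
          let p := pvCountB cs fuel (i + code.length) acc.2
          (acc.1 + p.1, p.2)
        else acc) (t, memo)).2) := by
  intro codes
  induction codes with
  | nil => intro _ t memo hinv; simp [hinv]
  | cons c cst ih =>
    intro hne t memo hinv
    have hcne : c ≠ [] := hne c (by simp)
    have hL : 0 < c.length := List.length_pos_of_ne_nil hcne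
    simp only [List.foldl_cons, List.map_cons, List.sum_cons]
    by_cases hm : (cs.drop i).take c.length = c
    · have hle : i + c.length ≤ cs.length := pvMatch_le cs i c hi.le hm
      have hfu : cs.length - (i + c.length) < fuel := by omega
      obtain ⟨hv, hinv'⟩ := IH (i + c.length) memo hle hfu hinv
      rw [if_pos hm]
      obtain ⟨ihs, ihinv⟩ := ih (fun x hx => hne x (by simp [hx]))
        (t + (pvCountB cs fuel (i + c.length) memo).1) (pvCountB cs fuel (i + c.length) memo).2 hinv'
      refine ⟨?_, ihinv⟩
      rw [ihs, hv, if_pos hm]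
      ring
    · rw [if_neg hm]
      obtain ⟨ihs, ihinv⟩ := ih (fun x hx => hne x (by simp [hx])) t memo hinv
      refine ⟨?_, ihinv⟩
      rw [ihs, if_neg hm]
      ring

lemma pvB_main (cs : List Char) :
    ∀ fuel i memo, i ≤ cs.length → cs.length - i < fuel → pvInv cs memo →
      (pvCountB cs fuel i memo).1 = pvW cs i ∧ pvInv cs (pvCountB cs fuel i memo).2 := by
  intro fuel
  induction fuel with
  | zero => intro i memo _ hf _; exact absurd hf (by omega)
  | succ fuel ih =>
    intro i memo hi hf hinv
    by_cases hieq : i = cs.length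
    · subst hieq
      rw [show pvCountB cs (fuel + 1) cs.length memo = (1, memo) from by simp [pvCountB]]
      exact ⟨(pvW_base cs cs.length le_rfl).symm, hinv⟩
    · have hilt : i < cs.length := lt_of_le_of_ne hi hieq
      cases hmg : memo.get? i with
      | some v =>
        rw [show pvCountB cs (fuel + 1) i memo = (v, memo) from by simp [pvCountB, hieq, hmg]]
        exact ⟨hinv i v hmg, hinv⟩
      | none =>
        obtain ⟨hv, hinv'⟩ := pvB_fold cs fuel ih i hilt (by omega) pvCodesB (by decide) 0 memo hinv
        rw [show ((pvCodesB.foldl (fun (acc : Int × PySem.Dict Nat Int) code =>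
            if (cs.drop i).take code.length = code then
              let p := pvCountB cs fuel (i + code.length) acc.2
              (acc.1 + p.1, p.2)
            else acc) ((0 : Int), memo))) = pvFoldB cs fuel i (0, memo) from rfl] at hv hinv'
        have heq : pvCountB cs (fuel + 1) i memo
            = ((pvFoldB cs fuel i (0, memo)).1,
               (pvFoldB cs fuel i (0, memo)).2.insert i (pvFoldB cs fuel i (0, memo)).1) := by
          simp [pvCountB, hieq, hmg, pvFoldB]
        rw [heq]
        have hval : (pvFoldB cs fuel i (0, memo)).1 = pvW cs i := by
          rw [hv, pvW_stepB cs i hilt]; ring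
        refine ⟨hval, ?_⟩
        intro k v hkv
        rw [PySem.Dict.get?_insert] at hkv
        by_cases hki : k = i
        · subst hki
          rw [if_pos rfl] at hkv
          rw [← hval]; exact (Option.some_injective _ hkv).symm
        · rw [if_neg hki] at hkv
          exact hinv' k v hkv

lemma pvB_eq (s : String) : count_vowel_sequences_alt s = pvW s.toList 0 := by
  unfold count_vowel_sequences_alt
  exact (pvB_main s.toList (s.toList.length + 1) 0 PySem.Dict.empty (by omega) (by omega)
    (fun k v h => by simp [PySem.Dict.get?_empty] at h)).1

-- ===== VERDICT (by name: the statement is the Claim_ definition above) =====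
theorem count_vowel_sequences_spec : Claim_equal_count_vowel_sequences := by
  intro s _
  unfold Spec_count_vowel_sequences
  rw [pvA_eq, pvB_eq]
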